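-- pv_equiv track=rewrite | github.com/liuhuanyong/WordMultiSenseDisambiguation | sens_cluster.py | clusters
-- ===== SOURCE A (Python) =====
-- def clusters(s):
--     clusters = []
--     for i in range(len(s)):
--         cluster = s[i]
--         for j in range(len(s)):
--             if set(s[i]).intersection(set(s[j])) and set(s[i]).intersection(set(cluster)) and set(s[j]).intersection(set(cluster)):
--                 cluster += s[i]
--                 cluster += s[j]
--         if set(cluster) not in clusters:
--             clusters.append(set(cluster))
--
--     return clusters
-- ===== SOURCE B (Python) =====
-- def clusters(s):
--     char_sets = [set(t) for t in s]
--     # index: character -> set of indices of strings containing that character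
--     idx = {}
--     for j, cs in enumerate(char_sets):
--         for c in cs:
--             idx.setdefault(c, set()).add(j)
--     out = []
--     for cs in char_sets:
--         js = sorted({j for c in cs for j in idx[c]})
--         merged = set(cs)
--         for j in js:
--             merged |= char_sets[j]
--         if merged not in out:
--             out.append(merged)
--     return out
-- ===== Notes on version B (the rewrite author's own statement) =====
-- stated objective: faster
-- what changed: Replaces the quadratic pairwise scan with ever-growing cluster strings by a precomputed character-to-string-indices index: each string's cluster is the union of the char-sets of the strings found through the index, deduplicated in one pass.
import Mathlib
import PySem

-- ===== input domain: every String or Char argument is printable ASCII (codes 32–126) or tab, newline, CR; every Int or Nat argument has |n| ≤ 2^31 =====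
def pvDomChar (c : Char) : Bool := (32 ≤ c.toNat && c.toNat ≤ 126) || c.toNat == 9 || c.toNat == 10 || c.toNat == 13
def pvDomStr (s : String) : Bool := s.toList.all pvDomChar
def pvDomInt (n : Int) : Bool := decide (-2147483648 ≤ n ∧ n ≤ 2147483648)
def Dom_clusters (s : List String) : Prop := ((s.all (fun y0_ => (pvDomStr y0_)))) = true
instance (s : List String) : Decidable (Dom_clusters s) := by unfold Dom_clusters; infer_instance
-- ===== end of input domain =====

-- B replaces A's quadratic pairwise scan over ever-growing cluster strings by a precomputed
-- character -> string-indices index (objective: faster; return values only, neither version mutates its argument).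

-- Python set elements here are one-character strings: set("ab") = {'a','b'}.
def pvMk1 (c : Char) : String := String.ofList [c]

-- set(t) for a piece of text t, as a PySem.Set of one-character strings
def pvCset (l : List Char) : PySem.Set String := PySem.Set.ofList (l.map pvMk1)

-- ===== PORT A =====
def clusters (s : List String) : List (List String) :=
  (List.range s.length).foldl (fun cls i =>
    let si := (s.getD i "").toList
    let cluster := (List.range s.length).foldl (fun cluster j =>
      let sj := (s.getD j "").toList
      if PySem.Set.inter (pvCset si) (pvCset sj) ≠ [] ∧
         PySem.Set.inter (pvCset si) (pvCset cluster) ≠ [] ∧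
         PySem.Set.inter (pvCset sj) (pvCset cluster) ≠ [] then
        cluster ++ si ++ sj
      else cluster) si
    -- 'set(cluster) not in clusters': Python list membership compares sets by ==, i.e. Set.equal
    if cls.any (fun t => PySem.Set.equal t (pvCset cluster)) then cls
    else cls ++ [pvCset cluster]) []

-- ===== PORT B =====
-- idx[c] is only read at characters c that were inserted, so Python's idx[c] never raises;
-- it is ported by the (there equal) total lookup getD.
def clusters_alt (s : List String) : List (List String) :=
  let charSets : List (PySem.Set String) := s.map (fun t => pvCset t.toList)
  let idx : PySem.Dict String (PySem.Set Int) :=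
    (PySem.List.enumerate charSets).foldl (fun (idx : PySem.Dict String (PySem.Set Int)) p =>
      p.2.foldl (fun idx c => idx.modify c [] (fun st => PySem.Set.add st p.1)) idx) PySem.Dict.empty
  charSets.foldl (fun out cs =>
    let js := PySem.List.sorted
      (cs.foldl (fun acc c => PySem.Set.update acc (idx.getD c [])) PySem.Set.empty)
      (fun x => x) false
    let merged := js.foldl (fun m j => PySem.Set.union m (PySem.List.pyGetD charSets j [])) cs
    if out.any (fun t => PySem.Set.equal t merged) then out
    else out ++ [merged]) []

-- ===== PRECONDITION & SPEC =====
def Spec_clusters (s : List String) (out : List (List String)) : Prop := out = clusters_alt s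
instance (s : List String) (out : List (List String)) : Decidable (Spec_clusters s out) := by unfold Spec_clusters; infer_instance

-- ===== CLAIM (what is proved, stated in full; the proofs are below) =====
def Claim_equal_clusters : Prop := ∀ (s : List String), Dom_clusters s → Spec_clusters s (clusters s)

-- ===== LEMMAS AND PROOFS =====

-- the characters of the j-th string
def pvS (s : List String) (j : Nat) : List Char := (s.getD j "").toList

-- 'a and b share a character'
def pvShare (a b : List Char) : Bool := decide (PySem.Set.inter (pvCset a) (pvCset b) ≠ [])

-- the indices of the strings of s sharing a character with a
def pvJ (s : List String) (a : List Char) : List Nat :=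
  (List.range s.length).filter (fun j => pvShare a (pvS s j))

-- the cluster set of a string with characters a: union of the char-sets of all sharing strings
def pvMerge (s : List String) (a : List Char) : PySem.Set String :=
  (pvJ s a).foldl (fun m j => PySem.Set.update m ((pvS s j).map pvMk1)) (pvCset a)

-- idx built by B, named for the proofs
def pvIdx (s : List String) : PySem.Dict String (PySem.Set Int) :=
  (PySem.List.enumerate (s.map (fun t => pvCset t.toList))).foldl
    (fun (idx : PySem.Dict String (PySem.Set Int)) p =>
      p.2.foldl (fun idx c => idx.modify c [] (fun st => PySem.Set.add st p.1)) idx) PySem.Dict.empty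

-- the common body of the (rephrased) outer loops
def pvG (s : List String) (cls : List (PySem.Set String)) (t : String) : List (PySem.Set String) :=
  if cls.any (fun u => PySem.Set.equal u (pvMerge s t.toList)) then cls
  else cls ++ [pvMerge s t.toList]

theorem pv_mem_cset (l : List Char) (x : String) : x ∈ pvCset l ↔ ∃ c ∈ l, x = pvMk1 c := by
  simp only [pvCset, PySem.Set.mem_ofList, List.mem_map]
  constructor
  · rintro ⟨c, hc, rfl⟩; exact ⟨c, hc, rfl⟩
  · rintro ⟨c, hc, rfl⟩; exact ⟨c, hc, rfl⟩

theorem pv_share_iff (a b : List Char) :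
    pvShare a b = true ↔ ∃ x, x ∈ pvCset a ∧ x ∈ pvCset b := by
  rw [pvShare, decide_eq_true_eq]
  constructor
  · intro h
    obtain ⟨x, hx⟩ := List.exists_mem_of_ne_nil _ h
    exact ⟨x, (PySem.Set.mem_inter _ _ _).mp hx⟩
  · rintro ⟨x, hxa, hxb⟩
    exact List.ne_nil_of_mem ((PySem.Set.mem_inter _ _ _).mpr ⟨hxa, hxb⟩)

theorem pv_update_absorb (t : PySem.Set String) (xs : List String) (h : ∀ x ∈ xs, x ∈ t) :
    PySem.Set.update t xs = t := by
  rw [PySem.Set.update_eq_append_filter]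
  have hnil : List.filter (fun y => !(PySem.Set.contains t y)) (PySem.Set.ofList xs) = [] := by
    rw [List.filter_eq_nil_iff]
    intro x hx
    have hxt : x ∈ t := h x ((PySem.Set.mem_ofList xs x).mp hx)
    simp only [Bool.not_eq_eq_eq_not, Bool.not_true, PySem.Set.contains_eq_listContains]
    simpa using hxt
  rw [hnil, List.append_nil]

theorem pv_update_ofList (t : PySem.Set String) (xs : List String) :
    PySem.Set.update t (PySem.Set.ofList xs) = PySem.Set.update t xs := by
  rw [PySem.Set.update_eq_append_filter, PySem.Set.update_eq_append_filter,
    PySem.Set.ofList_ofList]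

theorem pv_cond_iff (a b l : List Char) (hsub : ∀ c ∈ a, c ∈ l) :
    (PySem.Set.inter (pvCset a) (pvCset b) ≠ [] ∧
     PySem.Set.inter (pvCset a) (pvCset l) ≠ [] ∧
     PySem.Set.inter (pvCset b) (pvCset l) ≠ []) ↔ pvShare a b = true := by
  constructor
  · rintro ⟨h1, -, -⟩
    simpa [pvShare] using h1
  · intro h
    obtain ⟨x, hxa, hxb⟩ := (pv_share_iff a b).mp h
    have hxl : x ∈ pvCset l := by
      obtain ⟨c, hc, rfl⟩ := (pv_mem_cset a x).mp hxa
      exact (pv_mem_cset l _).mpr ⟨c, hsub c hc, rfl⟩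
    refine ⟨by simpa [pvShare] using h, ?_, ?_⟩
    · exact List.ne_nil_of_mem ((PySem.Set.mem_inter (pvCset a) (pvCset l) x).mpr ⟨hxa, hxl⟩)
    · exact List.ne_nil_of_mem ((PySem.Set.mem_inter (pvCset b) (pvCset l) x).mpr ⟨hxb, hxl⟩)

theorem pv_cset_append3 (l a b : List Char) (hsub : ∀ c ∈ a, c ∈ l) :
    pvCset (l ++ a ++ b) = PySem.Set.update (pvCset l) (b.map pvMk1) := by
  have h1 : pvCset (l ++ a) = pvCset l := by
    rw [pvCset, List.map_append, PySem.Set.ofList_append]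
    exact pv_update_absorb _ _ (by
      intro x hx
      obtain ⟨c, hc, rfl⟩ := List.mem_map.mp hx
      exact (pv_mem_cset l _).mpr ⟨c, hsub c hc, rfl⟩)
  have hmap : (l ++ a ++ b).map pvMk1 = (l ++ a).map pvMk1 ++ b.map pvMk1 := by
    simp
  rw [pvCset, hmap, PySem.Set.ofList_append,
    show PySem.Set.ofList ((l ++ a).map pvMk1) = pvCset l from h1]

theorem pv_inner (s : List String) (a : List Char) (jl : List Nat) (l : List Char)
    (hsub : ∀ c ∈ a, c ∈ l) :
    pvCset (jl.foldl (fun cluster j =>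
        let sj := (s.getD j "").toList
        if PySem.Set.inter (pvCset a) (pvCset sj) ≠ [] ∧
           PySem.Set.inter (pvCset a) (pvCset cluster) ≠ [] ∧
           PySem.Set.inter (pvCset sj) (pvCset cluster) ≠ [] then
          cluster ++ a ++ sj
        else cluster) l)
    = (jl.filter (fun j => pvShare a (pvS s j))).foldl
        (fun m j => PySem.Set.update m ((pvS s j).map pvMk1)) (pvCset l) := by
  induction jl generalizing l with
  | nil => simp
  | cons j tl ih =>
    simp only [List.foldl_cons, List.filter_cons, pvS]
    by_cases h : pvShare a ((s.getD j "").toList) = true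
    · rw [if_pos ((pv_cond_iff a ((s.getD j "").toList) l hsub).mpr h)]
      simp only [h, if_pos]
      rw [List.foldl_cons,
        ih (l ++ a ++ (s.getD j "").toList) (fun c hc => by simp [hsub c hc]),
        pv_cset_append3 l a _ hsub]
      simp only [pvS]
    · rw [if_neg (fun hc => h ((pv_cond_iff a ((s.getD j "").toList) l hsub).mp hc))]
      simp only [h]
      exact ih l hsub

theorem pv_A_set (s : List String) (a : List Char) :
    pvCset ((List.range s.length).foldl (fun cluster j =>
        let sj := (s.getD j "").toList
        if PySem.Set.inter (pvCset a) (pvCset sj) ≠ [] ∧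
           PySem.Set.inter (pvCset a) (pvCset cluster) ≠ [] ∧
           PySem.Set.inter (pvCset sj) (pvCset cluster) ≠ [] then
          cluster ++ a ++ sj
        else cluster) a)
    = pvMerge s a :=
  pv_inner s a (List.range s.length) a (fun _ hc => hc)

theorem pv_idx_inner (cs : List String) (d : PySem.Dict String (PySem.Set Int)) (k : Int)
    (c : String) :
    (cs.foldl (fun d c => d.modify c [] (fun st => PySem.Set.add st k)) d).getD c []
    = if c ∈ cs then PySem.Set.add (d.getD c []) k else d.getD c [] := by
  induction cs generalizing d with
  | nil => simp
  | cons x tl ih =>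
    simp only [List.foldl_cons, List.mem_cons]
    rw [ih, PySem.Dict.getD_modify]
    by_cases hcx : c = x
    · subst hcx
      by_cases hct : c ∈ tl
      · simp [hct]
      · simp [hct]
    · simp [hcx]

theorem pv_idx_mem (L : List (PySem.Set String)) (m : Int)
    (d : PySem.Dict String (PySem.Set Int)) (c : String) (j : Int) :
    j ∈ ((PySem.List.enumerate L m).foldl
        (fun (d : PySem.Dict String (PySem.Set Int)) p =>
          p.2.foldl (fun d c => d.modify c [] (fun st => PySem.Set.add st p.1)) d) d).getD c []
    ↔ j ∈ d.getD c [] ∨ ∃ k : Nat, k < L.length ∧ j = m + k ∧ c ∈ L.getD k [] := by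
  induction L generalizing m d with
  | nil => simp [PySem.List.enumerate]
  | cons x tl ih =>
    rw [PySem.List.enumerate_cons, List.foldl_cons, ih, pv_idx_inner]
    constructor
    · rintro (h | ⟨k, hk, rfl, hc⟩)
      · by_cases hcx : c ∈ x
        · rw [if_pos hcx] at h
          rcases (PySem.Set.mem_add _ _ _).mp h with h | rfl
          · exact Or.inl h
          · exact Or.inr ⟨0, by simp, by simp, by simpa using hcx⟩
        · rw [if_neg hcx] at h
          exact Or.inl h
      · exact Or.inr ⟨k + 1, by simpa using hk, by push_cast; ring, by simpa using hc⟩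
    · rintro (h | ⟨k, hk, rfl, hc⟩)
      · by_cases hcx : c ∈ x
        · exact Or.inl (by rw [if_pos hcx]; exact (PySem.Set.mem_add _ _ _).mpr (Or.inl h))
        · exact Or.inl (by rw [if_neg hcx]; exact h)
      · match k with
        | 0 =>
          refine Or.inl ?_
          have hcx : c ∈ x := by simpa using hc
          rw [if_pos hcx]
          exact (PySem.Set.mem_add _ _ _).mpr (Or.inr (by simp))
        | k + 1 =>
          exact Or.inr ⟨k, by simpa using hk, by push_cast; ring, by simpa using hc⟩

theorem pv_charSets_getD (s : List String) (k : Nat) (hk : k < s.length) :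
    (s.map (fun t => pvCset t.toList)).getD k [] = pvCset (pvS s k) := by
  rw [List.getD_eq_getElem _ _ (by simpa using hk), List.getElem_map, pvS,
    List.getD_eq_getElem _ _ hk]

theorem pv_idx_getD_mem (s : List String) (c : String) (j : Int) :
    j ∈ (pvIdx s).getD c []
    ↔ ∃ k : Nat, k < s.length ∧ j = (k : Int) ∧ c ∈ pvCset (pvS s k) := by
  rw [pvIdx, pv_idx_mem]
  simp only [PySem.Dict.getD_empty, List.not_mem_nil, false_or, List.length_map, zero_add]
  constructor
  · rintro ⟨k, hk, rfl, hc⟩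
    exact ⟨k, hk, rfl, by rwa [pv_charSets_getD s k hk] at hc⟩
  · rintro ⟨k, hk, rfl, hc⟩
    exact ⟨k, hk, rfl, by rwa [pv_charSets_getD s k hk]⟩

theorem pv_U_mem (idx : PySem.Dict String (PySem.Set Int)) (cs : List String)
    (acc : PySem.Set Int) (j : Int) :
    j ∈ cs.foldl (fun acc c => PySem.Set.update acc (idx.getD c [])) acc
    ↔ j ∈ acc ∨ ∃ c ∈ cs, j ∈ idx.getD c [] := by
  induction cs generalizing acc with
  | nil => simp
  | cons x tl ih =>
    rw [List.foldl_cons, ih]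
    simp [PySem.Set.mem_update, or_assoc]

theorem pv_U_nodup (idx : PySem.Dict String (PySem.Set Int)) (cs : List String)
    (acc : PySem.Set Int) (h : acc.Nodup) :
    (cs.foldl (fun acc c => PySem.Set.update acc (idx.getD c [])) acc).Nodup := by
  induction cs generalizing acc with
  | nil => exact h
  | cons x tl ih => exact ih _ (PySem.Set.nodup_update _ _ h)

theorem pv_js (s : List String) (a : List Char) :
    PySem.List.sorted
      ((pvCset a).foldl (fun acc c => PySem.Set.update acc ((pvIdx s).getD c []))
        PySem.Set.empty) (fun x => x) false
    = (pvJ s a).map (fun k => Int.ofNat k) := by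
  apply PySem.List.sorted_eq_of_perm_of_pairwise_lt
  · apply (List.perm_ext_iff_of_nodup ?_ ?_).mpr
    · intro j
      rw [List.mem_map, pv_U_mem]
      simp only [PySem.Set.empty, List.not_mem_nil, false_or]
      constructor
      · rintro ⟨k, hk, rfl⟩
        have hk' := hk
        rw [pvJ, List.mem_filter, List.mem_range] at hk'
        obtain ⟨hkn, hsh⟩ := hk'
        obtain ⟨x, hxa, hxk⟩ := (pv_share_iff a (pvS s k)).mp hsh
        exact ⟨x, hxa, (pv_idx_getD_mem s x _).mpr ⟨k, hkn, rfl, hxk⟩⟩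
      · rintro ⟨c, hca, hcj⟩
        obtain ⟨k, hkn, rfl, hck⟩ := (pv_idx_getD_mem s c j).mp hcj
        refine ⟨k, ?_, rfl⟩
        rw [pvJ, List.mem_filter, List.mem_range]
        exact ⟨hkn, (pv_share_iff a (pvS s k)).mpr ⟨c, hca, hck⟩⟩
    · exact List.Nodup.map (fun x y h => Int.ofNat.inj h)
        (List.Nodup.sublist List.filter_sublist (List.nodup_range))
    · exact pv_U_nodup _ _ _ List.nodup_nil
  · rw [List.pairwise_map]
    exact List.Pairwise.imp (fun h => Int.ofNat_lt.mpr h)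
      (List.Pairwise.sublist List.filter_sublist (List.pairwise_lt_range))

theorem pv_foldl_union (s : List String) (kl : List Nat) (h : ∀ k ∈ kl, k < s.length)
    (init : PySem.Set String) :
    (kl.map (fun k => Int.ofNat k)).foldl
      (fun m j => PySem.Set.union m (PySem.List.pyGetD (s.map (fun t => pvCset t.toList)) j []))
      init
    = kl.foldl (fun m k => PySem.Set.update m ((pvS s k).map pvMk1)) init := by
  induction kl generalizing init with
  | nil => rfl
  | cons k tl ih =>
    rw [List.map_cons, List.foldl_cons, List.foldl_cons]
    simp only [Int.ofNat_eq_natCast] at ih ⊢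
    rw [PySem.List.pyGetD_natCast, pv_charSets_getD s k (h k (List.mem_cons_self))]
    rw [ih (fun k hk => h k (List.mem_cons_of_mem _ hk))]
    congr 1
    show PySem.Set.update init (pvCset (pvS s k)) = _
    rw [pvCset, pv_update_ofList]

theorem pv_merged (s : List String) (a : List Char) :
    ((pvJ s a).map (fun k => Int.ofNat k)).foldl
      (fun m j => PySem.Set.union m (PySem.List.pyGetD (s.map (fun t => pvCset t.toList)) j []))
      (pvCset a)
    = pvMerge s a := by
  rw [pvMerge]
  exact pv_foldl_union s (pvJ s a)
    (fun k hk => by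
      rw [pvJ, List.mem_filter, List.mem_range] at hk
      exact hk.1) (pvCset a)

theorem pv_foldl_range_getD {α β : Type} (l : List α) (d : α) (g : β → α → β) (init : β) :
    (List.range l.length).foldl (fun acc i => g acc (l.getD i d)) init = l.foldl g init := by
  have h : (List.range l.length).map (fun i => l.getD i d) = l := by
    apply List.ext_getElem (by simp)
    intro i h1 h2
    rw [List.getElem_map, List.getElem_range]
    exact List.getD_eq_getElem l d h2
  calc (List.range l.length).foldl (fun acc i => g acc (l.getD i d)) init
      = ((List.range l.length).map (fun i => l.getD i d)).foldl g init := (List.foldl_map).symm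
    _ = l.foldl g init := by rw [h]

theorem pv_A_eq (s : List String) : clusters s = s.foldl (pvG s) [] := by
  rw [clusters, pv_foldl_range_getD s "" (fun cls t =>
    if cls.any (fun u => PySem.Set.equal u (pvCset ((List.range s.length).foldl (fun cluster j =>
        let sj := (s.getD j "").toList
        if PySem.Set.inter (pvCset t.toList) (pvCset sj) ≠ [] ∧
           PySem.Set.inter (pvCset t.toList) (pvCset cluster) ≠ [] ∧
           PySem.Set.inter (pvCset sj) (pvCset cluster) ≠ [] then
          cluster ++ t.toList ++ sj
        else cluster) t.toList))) then cls
    else cls ++ [pvCset ((List.range s.length).foldl (fun cluster j =>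
        let sj := (s.getD j "").toList
        if PySem.Set.inter (pvCset t.toList) (pvCset sj) ≠ [] ∧
           PySem.Set.inter (pvCset t.toList) (pvCset cluster) ≠ [] ∧
           PySem.Set.inter (pvCset sj) (pvCset cluster) ≠ [] then
          cluster ++ t.toList ++ sj
        else cluster) t.toList)]) []]
  apply PySem.List.foldl_congr_mem
  intro cls t _
  rw [pvG, pv_A_set s t.toList]

theorem pv_B_eq (s : List String) : clusters_alt s = s.foldl (pvG s) [] := by
  rw [clusters_alt]
  show (s.map (fun t => pvCset t.toList)).foldl _ [] = _
  rw [List.foldl_map]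
  apply PySem.List.foldl_congr_mem
  intro out t _
  show (if out.any (fun u => PySem.Set.equal u _) then out else out ++ [_]) = pvG s out t
  rw [show (PySem.List.enumerate (s.map (fun t => pvCset t.toList))).foldl
      (fun (idx : PySem.Dict String (PySem.Set Int)) p =>
        p.2.foldl (fun idx c => idx.modify c [] (fun st => PySem.Set.add st p.1)) idx)
      PySem.Dict.empty = pvIdx s from rfl,
    pv_js s t.toList, pv_merged s t.toList, pvG]

-- ===== VERDICT (by name: the statement is the Claim_ definition above) =====
theorem clusters_spec : Claim_equal_clusters := by
  intro s _
  unfold Spec_clusters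
  rw [pv_A_eq, pv_B_eq]
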